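-- pv_equiv track=rewrite | github.com/harthikss9/Witness.ai | CrashTruth-FaultAnalyzer.py | infer_causes
-- ===== SOURCE A (Python) =====
-- def infer_causes(all_track_flags):
--     causes = set()
--     if any("low_ttc_sustained" in f for f in all_track_flags):
--         causes.add("tailgating")
--     if any("hard_approach" in f for f in all_track_flags):
--         causes.add("hard_approach")
--     if any("sudden_cutin" in f for f in all_track_flags):
--         causes.add("cut_in")
--     if any("lateral_instability" in f for f in all_track_flags):
--         causes.add("weaving")
--     # stationary obstacle heuristic: at least one very slow track AND another track with low TTC
--     very_slow = any("very_slow_track" in f for f in all_track_flags)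
--     low_ttc   = any("low_ttc_sustained" in f or "hard_approach" in f for f in all_track_flags)
--     if very_slow and low_ttc:
--         causes.add("stationary_obstacle_ahead")
--     return sorted(causes)
-- ===== SOURCE B (Python) =====
-- # Declarative rule table: each cause fires iff, for every group of
-- # alternative trigger substrings, some flag contains one of them (CNF rules).
-- RULES = [
--     ("cut_in", [["sudden_cutin"]]),
--     ("hard_approach", [["hard_approach"]]),
--     ("stationary_obstacle_ahead", [["very_slow_track"],
--                                    ["low_ttc_sustained", "hard_approach"]]),
--     ("tailgating", [["low_ttc_sustained"]]),
--     ("weaving", [["lateral_instability"]]),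
-- ]
--
-- def infer_causes(all_track_flags):
--     return [cause for cause, groups in RULES
--             if all(any(p in f for f in all_track_flags for p in g)
--                    for g in groups)]
-- ===== Notes on version B (the rewrite author's own statement) =====
-- stated objective: alternative
-- what changed: B replaces A's hard-coded if-chain over a set-then-sort with a data-driven rule engine: an alphabetical table of CNF rules (cause, groups of alternative trigger substrings) filtered by a generic evaluator, so no set and no sort are needed.
import Mathlib
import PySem

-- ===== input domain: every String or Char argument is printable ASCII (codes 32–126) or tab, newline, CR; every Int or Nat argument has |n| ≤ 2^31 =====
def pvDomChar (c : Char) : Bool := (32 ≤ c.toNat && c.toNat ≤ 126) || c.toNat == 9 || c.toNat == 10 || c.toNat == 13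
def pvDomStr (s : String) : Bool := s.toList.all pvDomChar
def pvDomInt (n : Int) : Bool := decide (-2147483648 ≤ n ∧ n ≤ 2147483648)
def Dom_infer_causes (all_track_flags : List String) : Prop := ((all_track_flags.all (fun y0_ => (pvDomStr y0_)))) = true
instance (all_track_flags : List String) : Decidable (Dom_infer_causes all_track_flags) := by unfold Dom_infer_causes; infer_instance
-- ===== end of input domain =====

-- B replaces A's hard-coded if-chain + set + sort with a declarative table of CNF rules filtered by a generic evaluator (alternative decomposition, same cost).

-- ===== PORT A =====
def infer_causes (all_track_flags : List String) : List String :=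
  let causes : PySem.Set String := PySem.Set.empty
  let causes := if all_track_flags.any (fun f => PySem.Str.isIn "low_ttc_sustained" f) then causes.add "tailgating" else causes
  let causes := if all_track_flags.any (fun f => PySem.Str.isIn "hard_approach" f) then causes.add "hard_approach" else causes
  let causes := if all_track_flags.any (fun f => PySem.Str.isIn "sudden_cutin" f) then causes.add "cut_in" else causes
  let causes := if all_track_flags.any (fun f => PySem.Str.isIn "lateral_instability" f) then causes.add "weaving" else causes
  let very_slow := all_track_flags.any (fun f => PySem.Str.isIn "very_slow_track" f)
  let low_ttc := all_track_flags.any (fun f => PySem.Str.isIn "low_ttc_sustained" f || PySem.Str.isIn "hard_approach" f)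
  let causes := if very_slow && low_ttc then causes.add "stationary_obstacle_ahead" else causes
  PySem.List.sorted causes (fun x => x) false

-- ===== PORT B =====
-- the rule table: (cause, CNF groups of alternative trigger substrings), alphabetical
def pvRules : List (String × List (List String)) :=
  [("cut_in", [["sudden_cutin"]]),
   ("hard_approach", [["hard_approach"]]),
   ("stationary_obstacle_ahead", [["very_slow_track"], ["low_ttc_sustained", "hard_approach"]]),
   ("tailgating", [["low_ttc_sustained"]]),
   ("weaving", [["lateral_instability"]])]

def infer_causes_alt (all_track_flags : List String) : List String :=
  (pvRules.filter (fun r =>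
      r.2.all (fun g => all_track_flags.any (fun f => g.any (fun p => PySem.Str.isIn p f))))).map Prod.fst

-- ===== PRECONDITION & SPEC =====
def Spec_infer_causes (all_track_flags : List String) (out : List String) : Prop := out = infer_causes_alt all_track_flags
instance (all_track_flags : List String) (out : List String) : Decidable (Spec_infer_causes all_track_flags out) := by unfold Spec_infer_causes; infer_instance

-- ===== CLAIM (what is proved, stated in full; the proofs are below) =====
def Claim_equal_infer_causes : Prop := ∀ (all_track_flags : List String), Dom_infer_causes all_track_flags → Spec_infer_causes all_track_flags (infer_causes all_track_flags)

-- ===== LEMMAS AND PROOFS =====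

lemma any_or (xs : List String) (p q : String → Bool) :
    xs.any (fun f => p f || q f) = (xs.any p || xs.any q) := by
  induction xs with
  | nil => rfl
  | cons x xs ih =>
    simp [List.any_cons, ih]
    cases p x <;> cases q x <;> simp [Bool.or_assoc, Bool.or_left_comm]

-- ===== VERDICT (by name: the statement is the Claim_ definition above) =====
theorem infer_causes_spec : Claim_equal_infer_causes := by
  intro xs _
  show infer_causes xs = infer_causes_alt xs
  unfold infer_causes infer_causes_alt pvRules
  simp only [List.filter, List.all_cons, List.all_nil, List.any_cons, List.any_nil,
    Bool.or_false, Bool.and_true, List.map]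
  rw [any_or]
  cases h1 : xs.any (fun f => PySem.Str.isIn "low_ttc_sustained" f) <;>
  cases h2 : xs.any (fun f => PySem.Str.isIn "hard_approach" f) <;>
  cases h3 : xs.any (fun f => PySem.Str.isIn "sudden_cutin" f) <;>
  cases h4 : xs.any (fun f => PySem.Str.isIn "lateral_instability" f) <;>
  cases h5 : xs.any (fun f => PySem.Str.isIn "very_slow_track" f) <;>
  simp [PySem.Set.empty, PySem.Set.add, PySem.Set.contains,
        PySem.List.sorted, PySem.List.insertBy] <;> decide
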